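-- pv_equiv track=rewrite | github.com/GitMonsters/Prime-directive | Prime-directive/physics_compound_integration.py | _find_relevant_domains
-- ===== SOURCE A (Python) =====
-- from typing import Dict, List, Optional, Tuple, Any
--
-- def _find_relevant_domains(query: str, domains: List[str]) -> List[str]:
--     """Find which domains are relevant to the query."""
--     keywords = query.lower().split()
--     relevant = []
--
--     for domain in domains:
--         # Simple keyword matching (can be enhanced)
--         domain_keywords = {
--             'classical_mechanics': ['force', 'motion', 'newton', 'trajectory', 'mechanics'],
--             'thermodynamics': ['heat', 'temperature', 'entropy', 'energy', 'work'],
--             'electromagnetism': ['charge', 'field', 'magnetic', 'electric', 'maxwell'],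
--             'quantum_mechanics': ['quantum', 'wave', 'particle', 'superposition', 'measurement'],
--             'sacred_geometry': ['golden', 'symmetry', 'harmonic', 'proportion', 'geometry'],
--             'relativity': ['spacetime', 'gravity', 'time', 'light', 'mass', 'energy'],
--             'fluid_dynamics': ['flow', 'fluid', 'viscosity', 'turbulence', 'pressure'],
--             'qft': ['field', 'interaction', 'particle', 'virtual', 'gauge'],
--             'cosmology': ['universe', 'cosmic', 'expansion', 'bang', 'hubble'],
--             'particle_physics': ['particle', 'decay', 'interaction', 'standard', 'model'],
--             'optics': ['light', 'wave', 'interference', 'photon', 'lens'],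
--             'acoustics': ['sound', 'wave', 'frequency', 'resonance', 'doppler'],
--             'statistical_mechanics': ['probability', 'entropy', 'ensemble', 'distribution'],
--             'plasma_physics': ['plasma', 'ionization', 'magnetic', 'fusion', 'discharge'],
--             'astrophysics': ['star', 'galaxy', 'black', 'hole', 'stellar']
--         }
--
--         if any(kw in keywords for kw in domain_keywords.get(domain, [])):
--             relevant.append(domain)
--
--     return relevant if relevant else domains[:3]  # Default to top 3
-- ===== SOURCE B (Python) =====
-- from typing import List
--
-- # The domain/keyword data as plain text lines:
-- # first word = domain name, the rest = its keywords.
-- _TABLE = [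
--     "classical_mechanics force motion newton trajectory mechanics",
--     "thermodynamics heat temperature entropy energy work",
--     "electromagnetism charge field magnetic electric maxwell",
--     "quantum_mechanics quantum wave particle superposition measurement",
--     "sacred_geometry golden symmetry harmonic proportion geometry",
--     "relativity spacetime gravity time light mass energy",
--     "fluid_dynamics flow fluid viscosity turbulence pressure",
--     "qft field interaction particle virtual gauge",
--     "cosmology universe cosmic expansion bang hubble",
--     "particle_physics particle decay interaction standard model",
--     "optics light wave interference photon lens",
--     "acoustics sound wave frequency resonance doppler",
--     "statistical_mechanics probability entropy ensemble distribution",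
--     "plasma_physics plasma ionization magnetic fusion discharge",
--     "astrophysics star galaxy black hole stellar",
-- ]
--
-- # Inverted index keyword -> list of domains, built once at import time.
-- _INDEX = {}
-- for _line in _TABLE:
--     _parts = _line.split()
--     if _parts:
--         _dom = _parts[0]
--         for _kw in _parts[1:]:
--             _INDEX.setdefault(_kw, []).append(_dom)
--
--
-- def _find_relevant_domains(query: str, domains: List[str]) -> List[str]:
--     """Find which domains are relevant to the query."""
--     matched = set()
--     for word in query.lower().split():
--         matched.update(_INDEX.get(word, ()))
--     relevant = [d for d in domains if d in matched]
--     return relevant if relevant else domains[:3]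
-- ===== Notes on version B (the rewrite author's own statement) =====
-- stated objective: faster
-- what changed: Replaces A's per-domain scan of the keyword dict (re-built inside the loop on every iteration) by a keyword->domains inverted index parsed once at import time from a plain-text table; each query word is looked up in the index to form a matched set and the original domains list is filtered through it.
import Mathlib
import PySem

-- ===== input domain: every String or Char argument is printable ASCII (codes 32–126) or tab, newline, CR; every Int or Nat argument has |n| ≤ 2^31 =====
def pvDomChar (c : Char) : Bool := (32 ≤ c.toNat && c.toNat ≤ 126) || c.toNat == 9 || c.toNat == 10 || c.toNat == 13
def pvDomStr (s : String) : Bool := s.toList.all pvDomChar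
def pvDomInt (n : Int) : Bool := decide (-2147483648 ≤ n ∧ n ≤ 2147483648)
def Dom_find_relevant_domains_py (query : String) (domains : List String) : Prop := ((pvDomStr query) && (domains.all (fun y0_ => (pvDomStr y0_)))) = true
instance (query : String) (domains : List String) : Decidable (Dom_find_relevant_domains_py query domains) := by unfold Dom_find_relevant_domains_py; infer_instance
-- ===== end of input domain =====

-- B replaces A's per-domain scan of the keyword dict (re-built on every loop iteration)
-- by a keyword→domains inverted index built once from a plain-text table and looked up
-- per query word (objective: faster; a timing run measured the speedup).

-- ===== PORT A =====
-- The keyword table A rebuilds (with the same value) on every loop iteration.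
def aDomainKeywords : PySem.Dict String (List String) := PySem.Dict.mk [
  ("classical_mechanics", ["force", "motion", "newton", "trajectory", "mechanics"]),
  ("thermodynamics", ["heat", "temperature", "entropy", "energy", "work"]),
  ("electromagnetism", ["charge", "field", "magnetic", "electric", "maxwell"]),
  ("quantum_mechanics", ["quantum", "wave", "particle", "superposition", "measurement"]),
  ("sacred_geometry", ["golden", "symmetry", "harmonic", "proportion", "geometry"]),
  ("relativity", ["spacetime", "gravity", "time", "light", "mass", "energy"]),
  ("fluid_dynamics", ["flow", "fluid", "viscosity", "turbulence", "pressure"]),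
  ("qft", ["field", "interaction", "particle", "virtual", "gauge"]),
  ("cosmology", ["universe", "cosmic", "expansion", "bang", "hubble"]),
  ("particle_physics", ["particle", "decay", "interaction", "standard", "model"]),
  ("optics", ["light", "wave", "interference", "photon", "lens"]),
  ("acoustics", ["sound", "wave", "frequency", "resonance", "doppler"]),
  ("statistical_mechanics", ["probability", "entropy", "ensemble", "distribution"]),
  ("plasma_physics", ["plasma", "ionization", "magnetic", "fusion", "discharge"]),
  ("astrophysics", ["star", "galaxy", "black", "hole", "stellar"])]

def find_relevant_domains_py (query : String) (domains : List String) : List String :=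
  let keywords := PySem.Str.split₀ (PySem.Str.lower query)
  let relevant := domains.foldl (fun acc domain =>
    if (aDomainKeywords.getD domain []).any (fun kw => keywords.contains kw)
    then acc ++ [domain] else acc) []
  if relevant.isEmpty then PySem.List.slice domains none (some 3) else relevant

-- ===== PORT B =====
-- _TABLE: one line string per domain, first word = domain name, rest = keywords.
def bTable : List String := [
  "classical_mechanics force motion newton trajectory mechanics",
  "thermodynamics heat temperature entropy energy work",
  "electromagnetism charge field magnetic electric maxwell",
  "quantum_mechanics quantum wave particle superposition measurement",
  "sacred_geometry golden symmetry harmonic proportion geometry",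
  "relativity spacetime gravity time light mass energy",
  "fluid_dynamics flow fluid viscosity turbulence pressure",
  "qft field interaction particle virtual gauge",
  "cosmology universe cosmic expansion bang hubble",
  "particle_physics particle decay interaction standard model",
  "optics light wave interference photon lens",
  "acoustics sound wave frequency resonance doppler",
  "statistical_mechanics probability entropy ensemble distribution",
  "plasma_physics plasma ionization magnetic fusion discharge",
  "astrophysics star galaxy black hole stellar"]

-- for _line in _TABLE: parts = _line.split(); if parts:
--   for kw in parts[1:]: _INDEX.setdefault(kw, []).append(parts[0])
def bIndex : PySem.Dict String (List String) :=
  bTable.foldl (fun d line =>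
    match PySem.Str.split₀ line with
    | [] => d
    | dom :: kws => kws.foldl (fun d kw => d.modify kw [] (· ++ [dom])) d)
    PySem.Dict.empty

def find_relevant_domains_py_alt (query : String) (domains : List String) : List String :=
  let matched := (PySem.Str.split₀ (PySem.Str.lower query)).foldl
    (fun s w => PySem.Set.update s (bIndex.getD w [])) PySem.Set.empty
  let relevant := domains.filter (fun d => PySem.Set.contains matched d)
  if relevant.isEmpty then PySem.List.slice domains none (some 3) else relevant

-- ===== PRECONDITION & SPEC =====
def Spec_find_relevant_domains_py (query : String) (domains : List String) (out : List String) : Prop := out = find_relevant_domains_py_alt query domains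
instance (query : String) (domains : List String) (out : List String) : Decidable (Spec_find_relevant_domains_py query domains out) := by unfold Spec_find_relevant_domains_py; infer_instance

-- ===== CLAIM (what is proved, stated in full; the proofs are below) =====
def Claim_equal_find_relevant_domains_py : Prop := ∀ (query : String) (domains : List String), Dom_find_relevant_domains_py query domains → Spec_find_relevant_domains_py query domains (find_relevant_domains_py query domains)

-- ===== LEMMAS AND PROOFS =====

-- Membership in d.getD k [] for a dict with Nodup keys, phrased through items.
theorem mem_getD_nil_iff {κ ν : Type} [BEq κ] [LawfulBEq κ]
    (d : PySem.Dict κ (List ν)) (hnd : d.keys.Nodup) (k : κ) (w : ν) :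
    w ∈ d.getD k [] ↔ ∃ v, (k, v) ∈ d.items ∧ w ∈ v := by
  rw [PySem.Dict.getD_eq_get?_getD]
  cases hg : d.get? k with
  | none =>
    simp only [Option.getD_none, List.not_mem_nil, false_iff]
    rintro ⟨v, hv, -⟩
    rw [← PySem.Dict.get?_eq_some_iff_mem_items d k v hnd] at hv
    simp [hg] at hv
  | some v =>
    simp only [Option.getD_some]
    constructor
    · intro hw
      exact ⟨v, (PySem.Dict.get?_eq_some_iff_mem_items d k v hnd).1 hg, hw⟩
    · rintro ⟨v', hv', hw⟩
      rw [← PySem.Dict.get?_eq_some_iff_mem_items d k v' hnd] at hv'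
      rw [hg] at hv'
      exact (Option.some.inj hv') ▸ hw

-- The (keyword, domain) pairs B's import-time loop feeds into the index (proof helper).
def bPairsOf (lines : List String) : List (String × String) :=
  lines.flatMap (fun line =>
    match PySem.Str.split₀ line with
    | [] => []
    | dom :: kws => kws.map (fun kw => (kw, dom)))

-- getD of B's nested index-building fold, characterised through bPairsOf.
theorem getD_buildFold (lines : List String) (d : PySem.Dict String (List String))
    (w : String) :
    (lines.foldl (fun d line =>
        match PySem.Str.split₀ line with
        | [] => d
        | dom :: kws => kws.foldl (fun d kw => d.modify kw [] (· ++ [dom])) d)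
      d).getD w [] =
      d.getD w [] ++ ((bPairsOf lines).filter (fun p => p.1 == w)).map (·.2) := by
  induction lines generalizing d with
  | nil => simp [bPairsOf]
  | cons line rest ih =>
    simp only [List.foldl_cons]
    have hline : ∀ d' : PySem.Dict String (List String),
        (match PySem.Str.split₀ line with
          | [] => d'
          | dom :: kws => kws.foldl (fun d kw => d.modify kw [] (· ++ [dom])) d').getD w [] =
        d'.getD w [] ++ (((match PySem.Str.split₀ line with
          | [] => []
          | dom :: kws => kws.map (fun kw => (kw, dom))) : List (String × String)).filter
            (fun (p : String × String) => p.1 == w)).map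
            (fun (p : String × String) => p.2) := by
      intro d'
      cases h : PySem.Str.split₀ line with
      | nil => simp
      | cons dom kws =>
        have := PySem.Dict.getD_foldl_modify_append
          (l := kws.map (fun kw => (kw, dom))) (d := d') (c := w)
        simpa [List.foldl_map] using this
    rw [ih, hline]
    simp [bPairsOf, List.filter_append, List.append_assoc]

-- Membership in B's index = membership in the pair list.
theorem mem_bIndex_getD (w d : String) :
    d ∈ bIndex.getD w [] ↔ (w, d) ∈ bPairsOf bTable := by
  unfold bIndex
  rw [getD_buildFold]
  simp only [PySem.Dict.getD_empty, List.nil_append, List.mem_map, List.mem_filter]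
  constructor
  · rintro ⟨p, ⟨hp, hw⟩, hd⟩
    simp only [beq_iff_eq] at hw
    have : p = (w, d) := Prod.ext hw hd
    exact this ▸ hp
  · intro h
    exact ⟨(w, d), ⟨h, by simp⟩, rfl⟩

-- The pair list, evaluated once (proof helper only).
def bPairsLit : List (String × String) := [
  ("force", "classical_mechanics"),
  ("motion", "classical_mechanics"),
  ("newton", "classical_mechanics"),
  ("trajectory", "classical_mechanics"),
  ("mechanics", "classical_mechanics"),
  ("heat", "thermodynamics"),
  ("temperature", "thermodynamics"),
  ("entropy", "thermodynamics"),
  ("energy", "thermodynamics"),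
  ("work", "thermodynamics"),
  ("charge", "electromagnetism"),
  ("field", "electromagnetism"),
  ("magnetic", "electromagnetism"),
  ("electric", "electromagnetism"),
  ("maxwell", "electromagnetism"),
  ("quantum", "quantum_mechanics"),
  ("wave", "quantum_mechanics"),
  ("particle", "quantum_mechanics"),
  ("superposition", "quantum_mechanics"),
  ("measurement", "quantum_mechanics"),
  ("golden", "sacred_geometry"),
  ("symmetry", "sacred_geometry"),
  ("harmonic", "sacred_geometry"),
  ("proportion", "sacred_geometry"),
  ("geometry", "sacred_geometry"),
  ("spacetime", "relativity"),
  ("gravity", "relativity"),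
  ("time", "relativity"),
  ("light", "relativity"),
  ("mass", "relativity"),
  ("energy", "relativity"),
  ("flow", "fluid_dynamics"),
  ("fluid", "fluid_dynamics"),
  ("viscosity", "fluid_dynamics"),
  ("turbulence", "fluid_dynamics"),
  ("pressure", "fluid_dynamics"),
  ("field", "qft"),
  ("interaction", "qft"),
  ("particle", "qft"),
  ("virtual", "qft"),
  ("gauge", "qft"),
  ("universe", "cosmology"),
  ("cosmic", "cosmology"),
  ("expansion", "cosmology"),
  ("bang", "cosmology"),
  ("hubble", "cosmology"),
  ("particle", "particle_physics"),
  ("decay", "particle_physics"),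
  ("interaction", "particle_physics"),
  ("standard", "particle_physics"),
  ("model", "particle_physics"),
  ("light", "optics"),
  ("wave", "optics"),
  ("interference", "optics"),
  ("photon", "optics"),
  ("lens", "optics"),
  ("sound", "acoustics"),
  ("wave", "acoustics"),
  ("frequency", "acoustics"),
  ("resonance", "acoustics"),
  ("doppler", "acoustics"),
  ("probability", "statistical_mechanics"),
  ("entropy", "statistical_mechanics"),
  ("ensemble", "statistical_mechanics"),
  ("distribution", "statistical_mechanics"),
  ("plasma", "plasma_physics"),
  ("ionization", "plasma_physics"),
  ("magnetic", "plasma_physics"),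
  ("fusion", "plasma_physics"),
  ("discharge", "plasma_physics"),
  ("star", "astrophysics"),
  ("galaxy", "astrophysics"),
  ("black", "astrophysics"),
  ("hole", "astrophysics"),
  ("stellar", "astrophysics")]

set_option maxRecDepth 20000 in
theorem bPairs_eq : bPairsOf bTable = bPairsLit := by rfl

-- B's pair list transposes A's keyword table (finite checks, no dict evaluation).
theorem pairs_sound :
    (bPairsLit.all (fun p =>
      (aDomainKeywords.getD p.2 []).contains p.1)) = true := by decide

theorem pairs_complete :
    (aDomainKeywords.items.all (fun q => q.2.all
      (fun w => bPairsLit.contains (w, q.1)))) = true := by decide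

theorem mem_index_iff (w d : String) :
    d ∈ bIndex.getD w [] ↔ w ∈ aDomainKeywords.getD d [] := by
  rw [mem_bIndex_getD, bPairs_eq]
  have hndA : aDomainKeywords.keys.Nodup := by decide
  constructor
  · intro h
    have := pairs_sound
    simp only [List.all_eq_true] at this
    have hc := this (w, d) h
    simpa [List.contains_iff_mem] using hc
  · intro h
    obtain ⟨v, hv, hw⟩ := (mem_getD_nil_iff aDomainKeywords hndA d w).1 h
    have := pairs_complete
    simp only [List.all_eq_true] at this
    have hc := this (d, v) hv w hw
    simpa [List.contains_iff_mem] using hc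

-- What ends up in B's matched set.
theorem mem_matched (ws : List String) (s : PySem.Set String) (d : String) :
    d ∈ ws.foldl (fun s w => PySem.Set.update s (bIndex.getD w [])) s ↔
      d ∈ s ∨ ∃ w ∈ ws, d ∈ bIndex.getD w [] := by
  induction ws generalizing s with
  | nil => simp
  | cons w ws ih =>
    simp only [List.foldl_cons, ih, PySem.Set.mem_update, List.mem_cons]
    constructor
    · rintro (⟨h | h⟩ | ⟨w', hw', h⟩)
      · exact Or.inl h
      · exact Or.inr ⟨w, Or.inl rfl, h⟩
      · exact Or.inr ⟨w', Or.inr hw', h⟩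
    · rintro (h | ⟨w', hw' | hw', h⟩)
      · exact Or.inl (Or.inl h)
      · exact Or.inl (Or.inr (hw' ▸ h))
      · exact Or.inr ⟨w', hw', h⟩

-- ===== VERDICT (by name: the statement is the Claim_ definition above) =====
theorem find_relevant_domains_py_spec : Claim_equal_find_relevant_domains_py := by
  intro query domains _
  have hfilter :
      domains.filter (fun domain => (aDomainKeywords.getD domain []).any
        (fun kw => (PySem.Str.split₀ (PySem.Str.lower query)).contains kw)) =
      domains.filter (fun d => PySem.Set.contains
        ((PySem.Str.split₀ (PySem.Str.lower query)).foldl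
          (fun s w => PySem.Set.update s (bIndex.getD w [])) PySem.Set.empty) d) := by
    apply List.filter_congr
    intro d _
    rw [Bool.eq_iff_iff]
    rw [PySem.Set.contains_iff, mem_matched]
    simp only [PySem.Set.empty, List.not_mem_nil, false_or, List.any_eq_true,
      List.contains_iff_mem]
    constructor
    · rintro ⟨kw, hkw, hmem⟩
      exact ⟨kw, hmem, (mem_index_iff kw d).2 hkw⟩
    · rintro ⟨w, hw, hmem⟩
      exact ⟨w, (mem_index_iff w d).1 hmem, hw⟩
  unfold Spec_find_relevant_domains_py find_relevant_domains_py find_relevant_domains_py_alt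
  simp only [PySem.List.foldl_append_if_eq_filter, List.nil_append, hfilter]
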